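-- pv_equiv track=rewrite | github.com/shanmukh-07/Owl-coder | Easy/You and your books/you-and-your-books.py | max_Books
-- ===== SOURCE A (Python) =====
-- def max_Books(n, k, arr):
--     ans = 0
--     t = 0
--     for i in range(n):
--         if arr[i]<=k:
--             t += arr[i]
--             ans = max(ans,t)
--         else:
--             t = 0
--     return ans
-- ===== SOURCE B (Python) =====
-- def max_Books(n, k, arr):
--     # Two-phase: split the first n elements into maximal runs of values <= k,
--     # then take the best prefix sum over each run (threading the best through).
--     runs = []
--     cur = []
--     for i in range(n):
--         x = arr[i]
--         if x <= k:
--             cur.append(x)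
--         else:
--             if cur:
--                 runs.append(cur)
--             cur = []
--     if cur:
--         runs.append(cur)
--     best = 0
--     for run in runs:
--         s = 0
--         for x in run:
--             s += x
--             if s > best:
--                 best = s
--     return best
-- ===== Notes on version B (the rewrite author's own statement) =====
-- stated objective: alternative
-- what changed: B replaces A's single-pass reset-accumulator with a two-phase algorithm: it first materialises the maximal runs of elements <= k among the first n, then computes the best in-run prefix sum over those runs.
import Mathlib
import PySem

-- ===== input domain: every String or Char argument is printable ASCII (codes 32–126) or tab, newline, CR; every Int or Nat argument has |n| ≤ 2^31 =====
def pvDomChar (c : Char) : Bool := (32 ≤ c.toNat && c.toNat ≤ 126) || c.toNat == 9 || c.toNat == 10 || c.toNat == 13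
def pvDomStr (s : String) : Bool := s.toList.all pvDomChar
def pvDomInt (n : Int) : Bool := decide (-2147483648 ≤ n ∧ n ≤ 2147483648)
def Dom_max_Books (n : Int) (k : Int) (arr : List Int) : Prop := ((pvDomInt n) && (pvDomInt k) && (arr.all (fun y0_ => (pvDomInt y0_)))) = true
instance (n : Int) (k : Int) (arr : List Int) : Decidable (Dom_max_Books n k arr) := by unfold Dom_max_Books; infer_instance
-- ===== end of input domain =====

-- B splits the first n elements into maximal runs of values ≤ k and then takes the best
-- in-run prefix sum per run (objective: alternative two-phase decomposition of A's one-pass scan).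


-- ===== PORT A =====
def max_Books (n : Int) (k : Int) (arr : List Int) : Int :=
  let st := (PySem.List.pyRange 0 n 1).foldl
    (fun (p : Int × Int) i =>
      let x := PySem.List.pyGetD arr i 0
      if x ≤ k then (max p.1 (p.2 + x), p.2 + x) else (p.1, 0))
    (0, 0)
  st.1

-- ===== PORT B =====
def max_Books_alt (n : Int) (k : Int) (arr : List Int) : Int :=
  let st := (PySem.List.pyRange 0 n 1).foldl
    (fun (p : List (List Int) × List Int) i =>
      let x := PySem.List.pyGetD arr i 0
      if x ≤ k then (p.1, p.2 ++ [x])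
      else if p.2 ≠ [] then (p.1 ++ [p.2], []) else (p.1, []))
    ([], [])
  let runs := if st.2 ≠ [] then st.1 ++ [st.2] else st.1
  runs.foldl
    (fun best run =>
      (run.foldl (fun (q : Int × Int) x =>
          let s := q.2 + x
          (if s > q.1 then s else q.1, s)) (best, 0)).1)
    0

-- ===== PRECONDITION & SPEC =====
-- Pre_ excludes exactly the inputs where A raises IndexError: n exceeding len(arr).
def Pre_max_Books (n : Int) (k : Int) (arr : List Int) : Prop := n ≤ (arr.length : Int)
instance (n : Int) (k : Int) (arr : List Int) : Decidable (Pre_max_Books n k arr) := by unfold Pre_max_Books; infer_instance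
def pvWitness_max_Books : Int × Int × List Int := (4, 3, [1, 5, 2, 3])
def Spec_max_Books (n : Int) (k : Int) (arr : List Int) (out : Int) : Prop := out = max_Books_alt n k arr
instance (n : Int) (k : Int) (arr : List Int) (out : Int) : Decidable (Spec_max_Books n k arr out) := by unfold Spec_max_Books; infer_instance

-- ===== CLAIM (what is proved, stated in full; the proofs are below) =====
def Claim_equal_max_Books : Prop := ∀ (n : Int) (k : Int) (arr : List Int), Dom_max_Books n k arr → Pre_max_Books n k arr → Spec_max_Books n k arr (max_Books n k arr)

-- ===== LEMMAS AND PROOFS =====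

-- proof-side names for the two loop bodies
def stepA (k : Int) (p : Int × Int) (x : Int) : Int × Int :=
  if x ≤ k then (max p.1 (p.2 + x), p.2 + x) else (p.1, 0)

def step1 (k : Int) (p : List (List Int) × List Int) (x : Int) : List (List Int) × List Int :=
  if x ≤ k then (p.1, p.2 ++ [x])
  else if p.2 ≠ [] then (p.1 ++ [p.2], []) else (p.1, [])

def innerStep (q : Int × Int) (x : Int) : Int × Int :=
  (if q.2 + x > q.1 then q.2 + x else q.1, q.2 + x)

def phase2 (runs : List (List Int)) : Int :=
  runs.foldl (fun best run => (run.foldl innerStep (best, 0)).1) 0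

def closeRuns (p : List (List Int) × List Int) : List (List Int) :=
  if p.2 ≠ [] then p.1 ++ [p.2] else p.1

def absState (k : Int) (p : List (List Int) × List Int) : Int × Int :=
  p.2.foldl (stepA k) (phase2 p.1, 0)

lemma inner_eq_stepA (k : Int) (run : List Int) (h : ∀ x ∈ run, x ≤ k) :
    ∀ init, run.foldl innerStep init = run.foldl (stepA k) init := by
  induction run with
  | nil => intro init; rfl
  | cons x xs ih =>
    intro init
    have hx : x ≤ k := h x (by simp)
    have hxs : ∀ y ∈ xs, y ≤ k := fun y hy => h y (by simp [hy])
    simp only [List.foldl_cons, ih hxs]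
    congr 1
    simp only [innerStep, stepA, if_pos hx, Prod.mk.injEq, and_true, gt_iff_lt, max_def]
    split_ifs <;> omega

lemma abs_closeRuns (k : Int) (p : List (List Int) × List Int)
    (h : ∀ x ∈ p.2, x ≤ k) :
    phase2 (closeRuns p) = (absState k p).1 := by
  rcases p with ⟨runs, cur⟩
  by_cases hc : cur = []
  · subst hc; simp [closeRuns, absState]
  · simp only [closeRuns, absState, if_pos (show (runs, cur).2 ≠ [] from hc)]
    simp only [phase2, List.foldl_append, List.foldl_cons, List.foldl_nil]
    rw [inner_eq_stepA k cur h]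

lemma main_inv (k : Int) :
    ∀ (l : List Int) (p : List (List Int) × List Int),
      (∀ x ∈ p.2, x ≤ k) →
      (∀ x ∈ (l.foldl (step1 k) p).2, x ≤ k) ∧
        l.foldl (stepA k) (absState k p) = absState k (l.foldl (step1 k) p) := by
  intro l
  induction l with
  | nil => intro p h; exact ⟨h, rfl⟩
  | cons x xs ih =>
    intro p h
    by_cases hx : x ≤ k
    · have hcur : ∀ y ∈ (p.2 ++ [x]), y ≤ k := by
        intro y hy
        rcases List.mem_append.1 hy with hy | hy
        · exact h y hy
        · simp at hy; omega
      have hstep : step1 k p x = (p.1, p.2 ++ [x]) := by simp [step1, if_pos hx]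
      have habs : stepA k (absState k p) x = absState k (p.1, p.2 ++ [x]) := by
        simp [absState, List.foldl_append]
      simpa [List.foldl_cons, hstep, habs] using ih (p.1, p.2 ++ [x]) hcur
    · have hstep : step1 k p x = (closeRuns p, []) := by
        simp only [step1, if_neg hx, closeRuns]
        split_ifs <;> rfl
      have habs : stepA k (absState k p) x = absState k (closeRuns p, []) := by
        simp only [stepA, if_neg hx, absState, List.foldl_nil]
        rw [abs_closeRuns k p h]
        rfl
      have := ih (closeRuns p, []) (by simp)
      simpa [List.foldl_cons, hstep, habs] using this

lemma ports_eq_take (n k : Int) (arr : List Int) (hpre : n ≤ (arr.length : Int)) :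
    max_Books n k arr = max_Books_alt n k arr := by
  by_cases hn : n ≤ 0
  · simp [max_Books, max_Books_alt, PySem.List.pyRange_one_eq_nil (show n ≤ 0 from hn)]
  · set L := arr.take n.toNat with hL
    have hlen : (L.length : Int) = n := by
      simp only [hL, List.length_take]
      omega
    have hget : ∀ j ∈ PySem.List.pyRange 0 n 1,
        PySem.List.pyGetD arr j 0 = PySem.List.pyGetD L j 0 := by
      intro j hj
      rw [PySem.List.mem_pyRange_one] at hj
      rw [PySem.List.pyGetD_eq_getElem arr 0 hj.1 (by omega),
          PySem.List.pyGetD_eq_getElem L 0 hj.1 (by omega)]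
      simp [hL, List.getElem_take]
    have hA : max_Books n k arr = (L.foldl (stepA k) (0, 0)).1 := by
      show ((PySem.List.pyRange 0 n 1).foldl
          (fun p i => stepA k p (PySem.List.pyGetD arr i 0)) (0, 0)).1 = _
      rw [PySem.List.foldl_congr_mem _ _
          (fun p i => stepA k p (PySem.List.pyGetD L i 0)) _
          (fun acc j hj => by rw [hget j hj])]
      rw [← hlen, PySem.List.foldl_pyRange_zero_pyGetD' L 0 (stepA k) (0, 0)]
    have hB : max_Books_alt n k arr = phase2 (closeRuns (L.foldl (step1 k) ([], []))) := by
      show phase2 (closeRuns ((PySem.List.pyRange 0 n 1).foldl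
          (fun p i => step1 k p (PySem.List.pyGetD arr i 0)) ([], []))) = _
      rw [PySem.List.foldl_congr_mem _ _
          (fun p i => step1 k p (PySem.List.pyGetD L i 0)) _
          (fun acc j hj => by rw [hget j hj])]
      rw [← hlen, PySem.List.foldl_pyRange_zero_pyGetD' L 0 (step1 k) (([], []))]
    have hmain := main_inv k L ([], []) (by simp)
    have h0 : absState k (([] : List (List Int)), ([] : List Int)) = (0, 0) := by
      simp [absState, phase2]
    rw [hA, hB, abs_closeRuns k _ hmain.1, ← hmain.2, h0]

-- ===== VERDICT (by name: the statement is the Claim_ definition above) =====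
theorem max_Books_spec : Claim_equal_max_Books := by
  intro n k arr _ hpre
  unfold Spec_max_Books
  exact ports_eq_take n k arr hpre
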